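-- pv_equiv track=rewrite | github.com/SEJUNHONG/CodingTest | 프로그래머스 코딩테스트/부족한 금액 계산하기.py | solution
-- ===== SOURCE A (Python) =====
-- def solution(price, money, count):
--     answer = 0
--     time = 0
--     while count != 0:
--         time += 1
--         if money > price * time:
--             money -= price * time
--         else:
--             answer += price * time - money
--             money = 0
--         count -= 1
--
--     return answer
-- ===== SOURCE B (Python) =====
-- def solution(price, money, count):
--     total = price * count * (count + 1) // 2
--     return total - money if total > money else 0
-- ===== Notes on version B (the rewrite author's own statement) =====
-- stated objective: faster
-- what changed: Replaces the O(count) while-loop that simulates each ride with the closed-form triangular-number total price*count*(count+1)//2 and a single shortfall comparison.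
-- outside the precondition, e.g. on solution(-1, -5, 2): A returns 4, B returns 2; on solution(3, -7, 0): A returns 0, B returns 7
import Mathlib
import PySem

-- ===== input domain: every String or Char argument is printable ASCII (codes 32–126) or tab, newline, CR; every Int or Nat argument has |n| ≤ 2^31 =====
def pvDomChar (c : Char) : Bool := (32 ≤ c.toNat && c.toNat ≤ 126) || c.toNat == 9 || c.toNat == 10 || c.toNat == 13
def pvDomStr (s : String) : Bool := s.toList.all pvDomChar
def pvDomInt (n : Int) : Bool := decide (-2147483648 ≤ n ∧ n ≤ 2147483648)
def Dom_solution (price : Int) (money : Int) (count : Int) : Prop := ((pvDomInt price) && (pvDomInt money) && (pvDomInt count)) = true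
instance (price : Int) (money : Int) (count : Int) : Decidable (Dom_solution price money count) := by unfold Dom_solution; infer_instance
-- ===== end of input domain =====

-- B replaces A's per-ride simulation loop with the closed-form triangular total; O(count) → O(1).

-- ===== PORT A =====
-- the while loop of A, state (count-fuel, money, answer, time); count < 0 never returns in Python
def solutionLoop (price : Int) : Nat → Int → Int → Int → Int
  | 0, _, answer, _ => answer
  | Nat.succ c, money, answer, time =>
      let time := time + 1
      if money > price * time then
        solutionLoop price c (money - price * time) answer time
      else
        solutionLoop price c 0 (answer + (price * time - money)) time

def solution (price : Int) (money : Int) (count : Int) : Int :=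
  solutionLoop price count.toNat money 0 0

-- ===== PORT B =====
def solution_alt (price : Int) (money : Int) (count : Int) : Int :=
  let total := PySem.Int.floordiv (price * count * (count + 1)) 2
  if total > money then total - money else 0

-- ===== PRECONDITION & SPEC =====
-- Pre_ restricts to the problem's natural domain (Programmers guarantees price ≥ 0, money ≥ 0,
-- count ≥ 0): for count < 0 A never returns (infinite loop); for price < 0 A's if-branch ADDS
-- money back (money -= price*time with negative price), a leftover-state value no shortfall
-- formula matches; and at the corner count = 0 with money < 0 both "no rides → 0" (A) and
-- "shortfall total-money" (B) are defensible answers outside the stated domain.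
def Pre_solution (price : Int) (money : Int) (count : Int) : Prop :=
  0 ≤ price ∧ 0 ≤ count ∧ (0 < count ∨ 0 ≤ money)
instance (price : Int) (money : Int) (count : Int) : Decidable (Pre_solution price money count) := by unfold Pre_solution; infer_instance

def pvWitness_solution : Int × Int × Int := (3, 20, 4)

def Spec_solution (price : Int) (money : Int) (count : Int) (out : Int) : Prop := out = solution_alt price money count
instance (price : Int) (money : Int) (count : Int) (out : Int) : Decidable (Spec_solution price money count out) := by unfold Spec_solution; infer_instance

-- ===== CLAIM (what is proved, stated in full; the proofs are below) =====
def Claim_equal_solution : Prop := ∀ (price : Int) (money : Int) (count : Int), Dom_solution price money count → Pre_solution price money count → Spec_solution price money count (solution price money count)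

-- ===== LEMMAS AND PROOFS =====

-- triangular number c*(c+1)/2, the exact sum 1+2+…+c
def pvTri (c : Nat) : Nat := c * (c + 1) / 2

lemma pvTri_succ (c : Nat) : pvTri (c + 1) = pvTri c + (c + 1) := by
  unfold pvTri
  obtain ⟨k, hk⟩ := Nat.even_mul_succ_self c
  have h2 : (c + 1) * (c + 1 + 1) = c * (c + 1) + 2 * (c + 1) := by ring
  omega

-- remaining total fare for c more rides after `time` rides already priced
def pvRest (price : Int) (c : Nat) (time : Int) : Int :=
  price * ((c : Int) * time + (pvTri c : Int))

lemma pvRest_nonneg (price : Int) (c : Nat) (time : Int)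
    (hp : 0 ≤ price) (ht : 0 ≤ time) : 0 ≤ pvRest price c time := by
  unfold pvRest
  have h1 : (0 : Int) ≤ (c : Int) * time := mul_nonneg (by positivity) ht
  have h2 : (0 : Int) ≤ (pvTri c : Int) := by positivity
  nlinarith

lemma pvRest_succ (price : Int) (c : Nat) (time : Int) :
    pvRest price (c + 1) time = pvRest price c (time + 1) + price * (time + 1) := by
  unfold pvRest
  have h := pvTri_succ c
  push_cast [h]
  ring

-- loop invariant: with price ≥ 0 and time ≥ 0, the loop returns answer + max 0 (rest − money)
lemma solutionLoop_eq (price : Int) (hp : 0 ≤ price) :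
    ∀ (c : Nat) (money answer time : Int), 0 ≤ time → (0 ≤ money ∨ c ≠ 0) →
      solutionLoop price c money answer time = answer + max 0 (pvRest price c time - money) := by
  intro c
  induction c with
  | zero =>
      intro money answer time ht hm
      rcases hm with hm | hm
      · simp [solutionLoop, pvRest, pvTri]
        omega
      · exact absurd rfl hm
  | succ c ih =>
      intro money answer time ht hm
      have ht' : (0 : Int) ≤ time + 1 := by omega
      have hpt : (0 : Int) ≤ price * (time + 1) := mul_nonneg hp ht'
      by_cases h : money > price * (time + 1)
      · -- if branch: pay price*(time+1), keep riding
        have hm' : (0 : Int) ≤ money - price * (time + 1) := by omega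
        rw [show solutionLoop price (c + 1) money answer time
              = solutionLoop price c (money - price * (time + 1)) answer (time + 1) by
            simp [solutionLoop, h]]
        rw [ih _ _ _ ht' (Or.inl hm')]
        rw [pvRest_succ]
        congr 1
        omega
      · -- else branch: shortfall recorded, money set to 0
        rw [show solutionLoop price (c + 1) money answer time
              = solutionLoop price c 0 (answer + (price * (time + 1) - money)) (time + 1) by
            simp [solutionLoop, h]]
        rw [ih _ _ _ ht' (Or.inl le_rfl)]
        have hr := pvRest_nonneg price c (time + 1) hp ht'
        have hrs := pvRest_succ price c time
        omega

-- the closed form: price * tri n equals the floordiv total of B for count = n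
lemma pvTotal_eq (price : Int) (n : Nat) :
    PySem.Int.floordiv (price * (n : Int) * ((n : Int) + 1)) 2 = price * (pvTri n : Int) := by
  obtain ⟨k, hk⟩ := Nat.even_mul_succ_self n
  have htri : pvTri n = k := by unfold pvTri; omega
  have h1 : ((n : Int)) * ((n : Int) + 1) = 2 * (k : Int) := by
    have := congrArg (Nat.cast : Nat → Int) hk
    push_cast at this
    linarith
  have hprod : price * (n : Int) * ((n : Int) + 1) = 2 * (price * (k : Int)) := by
    rw [mul_assoc, h1]; ring
  rw [hprod, htri]
  simp [PySem.Int.floordiv]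

-- ===== VERDICT (by name: the statement is the Claim_ definition above) =====
theorem solution_spec : Claim_equal_solution := by
  intro price money count _ hpre
  obtain ⟨hp, hc, hm⟩ := hpre
  obtain ⟨n, rfl⟩ : ∃ m : Nat, count = (m : Int) := ⟨count.toNat, (Int.toNat_of_nonneg hc).symm⟩
  unfold Spec_solution solution solution_alt
  have hm' : 0 ≤ money ∨ ((n : Int)).toNat ≠ 0 := by
    rcases hm with h | h
    · right; omega
    · left; exact h
  rw [solutionLoop_eq price hp ((n : Int)).toNat money 0 0 le_rfl hm']
  simp only [Int.toNat_natCast, pvTotal_eq, pvRest]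
  simp only [mul_zero, zero_add]
  split_ifs <;> omega
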